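-- pv_equiv track=rewrite | github.com/JeonJe/Algorithm | 95.COS/1급/5차/5차 1급 5_initial_code.py | solution
-- ===== SOURCE A (Python) =====
-- def solution(enemies, armies):
--     #여기에 코드를 작성해주세요.
--     answer = 0
--     enemies.sort()
--     armies.sort()
--
--     for a in armies:
--         temp = -1
--         for e in range(len(enemies)):
--             if a>= enemies[e]:
--                 answer+=1
--                 temp = e
--                 break
--
--         if temp != -1:  # 현재 아군이 적을 이겼으면
--             enemies.pop(e) # 이긴 적 삭제
--
--     return answer
-- ===== SOURCE B (Python) =====
-- def solution(enemies, armies):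
--     es = sorted(enemies)
--     i = 0
--     for a in sorted(armies):
--         if i < len(es) and a >= es[i]:
--             i += 1
--     return i
-- ===== Notes on version B (the rewrite author's own statement) =====
-- stated objective: faster
-- what changed: Replaces A's per-army inner scan plus list.pop (quadratic) by a single counter sweep over sorted copies: on a sorted enemy list the first beatable enemy is always the current front, so one index replaces scan+pop; B also does not mutate its arguments.
import Mathlib
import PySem

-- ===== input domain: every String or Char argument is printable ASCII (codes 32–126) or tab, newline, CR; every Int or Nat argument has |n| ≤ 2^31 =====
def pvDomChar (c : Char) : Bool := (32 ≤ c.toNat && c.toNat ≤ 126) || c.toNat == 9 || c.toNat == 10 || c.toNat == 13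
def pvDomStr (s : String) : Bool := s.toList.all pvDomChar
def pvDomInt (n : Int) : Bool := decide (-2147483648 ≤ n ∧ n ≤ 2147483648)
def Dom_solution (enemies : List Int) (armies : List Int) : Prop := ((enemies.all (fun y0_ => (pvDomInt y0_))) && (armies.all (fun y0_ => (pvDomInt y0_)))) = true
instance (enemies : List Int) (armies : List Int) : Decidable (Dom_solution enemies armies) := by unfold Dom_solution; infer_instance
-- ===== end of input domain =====

-- B replaces A's quadratic scan+pop greedy matching by a counter sweep over sorted copies (measured faster);
-- A sorts/pops its argument lists in place, B does not — the equivalence proved is about the return value only.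


-- ===== PORT A =====
-- inner 'for e in range(len(enemies)): if a >= enemies[e]: …; break' — first index won by a
def firstWinIdx (a : Int) : List Int → Nat → Option Nat
  | [], _ => none
  | e :: rest, i => if a ≥ e then some i else firstWinIdx a rest (i + 1)

-- one iteration of A's outer loop: state = (current enemies list, answer)
def solutionStep (st : List Int × Int) (a : Int) : List Int × Int :=
  match firstWinIdx a st.1 0 with
  | some e =>
      -- enemies.pop(e); the found index is always valid so pop? is some (getD default unreachable)
      (((PySem.List.pop? st.1 (e : Int)).map Prod.snd).getD st.1, st.2 + 1)
  | none => st

def solution (enemies : List Int) (armies : List Int) : Int :=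
  let es := PySem.List.sorted enemies (fun x => x) false
  let ar := PySem.List.sorted armies (fun x => x) false
  (ar.foldl solutionStep (es, 0)).2

-- ===== PORT B =====
def solution_alt (enemies : List Int) (armies : List Int) : Int :=
  let es := PySem.List.sorted enemies (fun x => x) false
  ((PySem.List.sorted armies (fun x => x) false).foldl
    (fun (i : Nat) a => if h : i < es.length then (if a ≥ es[i] then i + 1 else i) else i) 0 : Nat)

-- ===== PRECONDITION & SPEC =====
def Spec_solution (enemies : List Int) (armies : List Int) (out : Int) : Prop := out = solution_alt enemies armies
instance (enemies : List Int) (armies : List Int) (out : Int) : Decidable (Spec_solution enemies armies out) := by unfold Spec_solution; infer_instance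

-- ===== CLAIM (what is proved, stated in full; the proofs are below) =====
def Claim_equal_solution : Prop := ∀ (enemies : List Int) (armies : List Int), Dom_solution enemies armies → Spec_solution enemies armies (solution enemies armies)

-- ===== LEMMAS AND PROOFS =====

-- If a beats no element, the scan finds nothing.
theorem firstWinIdx_eq_none (a : Int) (l : List Int) (h : ∀ x ∈ l, ¬ a ≥ x) :
    ∀ i, firstWinIdx a l i = none := by
  induction l with
  | nil => intro i; rfl
  | cons x xs ih =>
      intro i
      simp only [firstWinIdx, if_neg (h x (List.mem_cons_self))]
      exact ih (fun y hy => h y (List.mem_cons_of_mem _ hy)) (i + 1)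

-- On a sorted list the first beatable enemy is the front or nothing.
theorem firstWinIdx_sorted (a : Int) (h : Int) (t : List Int)
    (hs : (h :: t).Pairwise (· ≤ ·)) :
    firstWinIdx a (h :: t) 0 = if a ≥ h then some 0 else none := by
  by_cases hah : a ≥ h
  · simp [firstWinIdx, hah]
  · simp only [firstWinIdx]
    rw [if_neg hah, if_neg hah]
    exact firstWinIdx_eq_none a t
      (fun x hx hax => hah (le_trans ((List.pairwise_cons.mp hs).1 x hx) hax)) 1

-- Loop invariant: A's state is (drop i of the sorted enemies, i) where i is B's counter.
set_option maxRecDepth 4096 in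
theorem loop_inv (S : List Int) (hs : S.Pairwise (· ≤ ·)) :
    ∀ (ar : List Int) (i : Nat),
      ar.foldl solutionStep (S.drop i, (i : Int)) =
        (S.drop (ar.foldl
          (fun (j : Nat) a => if h : j < S.length then (if a ≥ S[j] then j + 1 else j) else j) i),
         Nat.cast (ar.foldl
          (fun (j : Nat) a => if h : j < S.length then (if a ≥ S[j] then j + 1 else j) else j) i)) := by
  intro ar
  induction ar with
  | nil => intro i; rfl
  | cons a rest ih =>
      intro i
      simp only [List.foldl_cons]
      by_cases hi : i < S.length
      · have hdrop : S.drop i = S[i] :: S.drop (i + 1) := List.drop_eq_getElem_cons hi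
        have hsd : (S[i] :: S.drop (i + 1)).Pairwise (· ≤ ·) := by
          rw [← hdrop]; exact List.Pairwise.sublist (List.drop_sublist i S) hs
        by_cases ha : a ≥ S[i]
        · have hw : firstWinIdx a (S.drop i) 0 = some 0 := by
            rw [hdrop, firstWinIdx_sorted a _ _ hsd, if_pos ha]
          have : solutionStep (S.drop i, (i : Int)) a = (S.drop (i + 1), ((i + 1 : Nat) : Int)) := by
            simp only [solutionStep, hw]
            rw [hdrop, show ((0 : Nat) : Int) = 0 from rfl, PySem.List.pop?_zero_cons]
            rfl
          rw [this, ih (i + 1)]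
          simp only [dif_pos hi, if_pos ha]
        · have hw : firstWinIdx a (S.drop i) 0 = none := by
            rw [hdrop, firstWinIdx_sorted a _ _ hsd, if_neg ha]
          have : solutionStep (S.drop i, (i : Int)) a = (S.drop i, (i : Int)) := by
            simp only [solutionStep, hw]
          rw [this, ih i]
          simp only [dif_pos hi, if_neg ha]
      · have hdrop : S.drop i = [] := List.drop_eq_nil_of_le (le_of_not_gt hi)
        have : solutionStep (S.drop i, (i : Int)) a = (S.drop i, (i : Int)) := by
          rw [solutionStep, hdrop]
          rfl
        rw [this, ih i]
        simp only [dif_neg hi]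

-- ===== VERDICT (by name: the statement is the Claim_ definition above) =====
theorem solution_spec : Claim_equal_solution := by
  intro enemies armies _
  unfold Spec_solution solution solution_alt
  have hs : (PySem.List.sorted enemies (fun x => x) false).Pairwise (· ≤ ·) :=
    PySem.List.sorted_pairwise enemies (fun x => x)
  have := loop_inv (PySem.List.sorted enemies (fun x => x) false) hs
    (PySem.List.sorted armies (fun x => x) false) 0
  simp only [List.drop_zero, Int.natCast_zero] at this
  simp [this]
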